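-- pv_equiv track=rewrite | github.com/yjnl/python_abbreviations | liu_getabbreviations.py | deduplicateWithin
-- ===== SOURCE A (Python) =====
-- def deduplicateWithin(abbreviations,abbreviationscores):
--     Wdeduplicatedabbs = []
--     Wdeduplicatedscores = []
--
--     # For each name, a unique dictionary is used to store the abbreviations
--     #     for that name and their scores
--     for nameindex in range(len(abbreviations)):
--         minabbscore = {}
--         for abbindex in range(len(abbreviations[nameindex])):
--
--             # storing the current abbreviation and score in variables
--             #     so as to avoid a very long if statement
--             currentabbreviation = abbreviations[nameindex][abbindex]
--             currentscore = abbreviationscores[nameindex][abbindex]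
--
--             # update the dictionary only if the abbreviation is not yet in it or if a new abbreviation has a lower score
--             if currentabbreviation not in minabbscore or currentabbreviation in minabbscore and currentscore < minabbscore[currentabbreviation]:
--                 minabbscore.update({abbreviations[nameindex][abbindex]:abbreviationscores[nameindex][abbindex]})
--         Wdeduplicatedabbs.append(list(minabbscore.keys()))
--         Wdeduplicatedscores.append(list(minabbscore.values()))
--
--     return Wdeduplicatedabbs,Wdeduplicatedscores
-- ===== SOURCE B (Python) =====
-- def deduplicateWithin(abbreviations, abbreviationscores):
--     keys_out, vals_out = [], []
--     for abbs, scores in zip(abbreviations, abbreviationscores):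
--         groups = {}
--         for a, s in zip(abbs, scores):
--             groups.setdefault(a, []).append(s)
--         keys_out.append(list(groups))
--         vals_out.append([min(g) for g in groups.values()])
--     return keys_out, vals_out
-- ===== Notes on version B (the rewrite author's own statement) =====
-- stated objective: alternative
-- what changed: Instead of maintaining a running-minimum dict with a conditional update per element, B groups all scores per abbreviation into lists in one zip-driven pass and then reduces each group with min() in a second pass.
-- outside the precondition, e.g. on deduplicateWithin([['a'], []], [[5]]): A returns ([['a'], []], [[5], []]), B returns ([['a']], [[5]])
import Mathlib
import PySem

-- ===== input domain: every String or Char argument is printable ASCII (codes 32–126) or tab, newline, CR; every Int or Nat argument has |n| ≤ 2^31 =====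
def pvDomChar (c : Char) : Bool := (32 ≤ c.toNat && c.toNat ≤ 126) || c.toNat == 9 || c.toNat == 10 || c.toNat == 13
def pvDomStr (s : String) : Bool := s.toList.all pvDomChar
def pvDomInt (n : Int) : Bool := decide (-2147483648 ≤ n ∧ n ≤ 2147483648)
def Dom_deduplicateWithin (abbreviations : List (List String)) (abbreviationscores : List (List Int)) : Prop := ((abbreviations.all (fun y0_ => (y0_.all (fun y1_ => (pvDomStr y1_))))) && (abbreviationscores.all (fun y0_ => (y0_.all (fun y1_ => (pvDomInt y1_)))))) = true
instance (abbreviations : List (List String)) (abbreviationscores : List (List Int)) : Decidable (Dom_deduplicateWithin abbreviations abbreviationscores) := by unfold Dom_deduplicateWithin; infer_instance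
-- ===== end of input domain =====

-- B groups all scores per abbreviation into lists in one pass and reduces each
-- group with min in a second pass (alternative decomposition; same cost).

-- ===== PORT A =====
def deduplicateWithin (abbreviations : List (List String)) (abbreviationscores : List (List Int)) : List (List String) × List (List Int) :=
  (PySem.List.pyRange 0 (abbreviations.length : Int) 1).foldl
    (fun (acc : List (List String) × List (List Int)) nameindex =>
      let minabbscore :=
        (PySem.List.pyRange 0 ((PySem.List.pyGetD abbreviations nameindex []).length : Int) 1).foldl
          (fun (minabbscore : PySem.Dict String Int) abbindex =>
            let currentabbreviation := PySem.List.pyGetD (PySem.List.pyGetD abbreviations nameindex []) abbindex ""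
            let currentscore := PySem.List.pyGetD (PySem.List.pyGetD abbreviationscores nameindex []) abbindex 0
            if (!(minabbscore.contains currentabbreviation)) ||
               ((minabbscore.contains currentabbreviation) &&
                decide (currentscore < minabbscore.getD currentabbreviation 0)) then
              minabbscore.insert currentabbreviation currentscore
            else minabbscore)
          PySem.Dict.empty
      (acc.1 ++ [minabbscore.keys], acc.2 ++ [minabbscore.values]))
    ([], [])

-- ===== PORT B =====
def deduplicateWithin_alt (abbreviations : List (List String)) (abbreviationscores : List (List Int)) : List (List String) × List (List Int) :=
  (abbreviations.zip abbreviationscores).foldl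
    (fun (acc : List (List String) × List (List Int)) p =>
      let groups :=
        (p.1.zip p.2).foldl
          (fun (groups : PySem.Dict String (List Int)) q =>
            groups.modify q.1 [] (fun l => l ++ [q.2]))
          PySem.Dict.empty
      (acc.1 ++ [groups.keys],
       acc.2 ++ [groups.values.map (fun gl => (PySem.List.min? gl (fun y => y)).getD 0)]))
    ([], [])

-- ===== PRECONDITION & SPEC =====
-- Pre_ excludes inputs whose score table is shorter than the abbreviation table,
-- name by name: A raises IndexError on almost all of them, and in the degenerate
-- corner where the surplus names carry empty abbreviation lists (so A never indexes
-- the missing score rows) both behaviours on the malformed parallel tables are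
-- defensible: A appends empty rows for the surplus names, B stops at the zip length.
def Pre_deduplicateWithin (abbreviations : List (List String)) (abbreviationscores : List (List Int)) : Prop :=
  abbreviations.length ≤ abbreviationscores.length ∧
  ∀ p ∈ abbreviations.zip abbreviationscores, p.1.length ≤ p.2.length
instance (abbreviations : List (List String)) (abbreviationscores : List (List Int)) : Decidable (Pre_deduplicateWithin abbreviations abbreviationscores) := by unfold Pre_deduplicateWithin; infer_instance

def pvWitness_deduplicateWithin : List (List String) × List (List Int) :=
  ([["ab", "cd", "ab"]], [[3, 1, 2]])

def Spec_deduplicateWithin (abbreviations : List (List String)) (abbreviationscores : List (List Int)) (out : List (List String) × List (List Int)) : Prop := out = deduplicateWithin_alt abbreviations abbreviationscores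
instance (abbreviations : List (List String)) (abbreviationscores : List (List Int)) (out : List (List String) × List (List Int)) : Decidable (Spec_deduplicateWithin abbreviations abbreviationscores out) := by unfold Spec_deduplicateWithin; infer_instance

-- ===== CLAIM (what is proved, stated in full; the proofs are below) =====
def Claim_equal_deduplicateWithin : Prop := ∀ (abbreviations : List (List String)) (abbreviationscores : List (List Int)), Dom_deduplicateWithin abbreviations abbreviationscores → Pre_deduplicateWithin abbreviations abbreviationscores → Spec_deduplicateWithin abbreviations abbreviationscores (deduplicateWithin abbreviations abbreviationscores)

-- ===== LEMMAS AND PROOFS =====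

-- Python's min over a nonempty list of ints ([] gets a junk value, never used).
def pymin (l : List Int) : Int := match l with | [] => 0 | x :: t => t.foldl min x

def pvG (p : String × List Int) : String × Int := (p.1, pymin p.2)

theorem pymin_append_singleton (l : List Int) (h : l ≠ []) (s : Int) :
    pymin (l ++ [s]) = min (pymin l) s := by
  cases l with
  | nil => simp at h
  | cons x t => simp [pymin, List.foldl_append]

-- an index loop over two parallel lists is a loop over their zip
theorem foldl_range_two {α β γ : Type} (as : List α) (ss : List β) (da : α) (db : β)
    (f : γ → α → β → γ) (init : γ) (h : as.length ≤ ss.length) :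
    (PySem.List.pyRange 0 (as.length : Int) 1).foldl
      (fun d i => f d (PySem.List.pyGetD as i da) (PySem.List.pyGetD ss i db)) init
    = (as.zip ss).foldl (fun d q => f d q.1 q.2) init := by
  have hmap : (PySem.List.pyRange 0 (as.length : Int) 1).map
      (fun i => (PySem.List.pyGetD as i da, PySem.List.pyGetD ss i db)) = as.zip ss := by
    apply List.ext_getElem
    · simp [PySem.List.length_pyRange_one]; omega
    · intro k h1 h2
      have hk : k < as.length := by
        simp [PySem.List.length_pyRange_one] at h1; omega
      have hk2 : k < ss.length := lt_of_lt_of_le hk h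
      have hidx : (PySem.List.pyRange 0 (as.length : Int) 1)[k]'(by simpa using h1) = (k : Int) := by
        simpa using PySem.List.getElem_pyRange_one 0 (as.length : Int) k (by simpa using h1)
      simp only [List.getElem_map, hidx, List.getElem_zip]
      rw [PySem.List.pyGetD_eq_getElem as da (by positivity) (by exact_mod_cast hk),
          PySem.List.pyGetD_eq_getElem ss db (by positivity) (by exact_mod_cast hk2)]
      simp
  calc (PySem.List.pyRange 0 (as.length : Int) 1).foldl
        (fun d i => f d (PySem.List.pyGetD as i da) (PySem.List.pyGetD ss i db)) init
      = ((PySem.List.pyRange 0 (as.length : Int) 1).map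
          (fun i => (PySem.List.pyGetD as i da, PySem.List.pyGetD ss i db))).foldl
          (fun d q => f d q.1 q.2) init := by rw [List.foldl_map]
    _ = (as.zip ss).foldl (fun d q => f d q.1 q.2) init := by rw [hmap]

theorem get?_mk_map_pvG (l : List (String × List Int)) (k : String) :
    (PySem.Dict.mk (l.map pvG)).get? k = (Option.map pymin ((PySem.Dict.mk l).get? k)) := by
  induction l with
  | nil => simp [PySem.Dict.get?]
  | cons p t ih =>
      simp only [List.map_cons]
      rw [show (pvG p) = (p.1, pymin p.2) from rfl]
      rw [PySem.Dict.get?_mk_cons, PySem.Dict.get?_mk_cons]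
      by_cases hk : p.1 == k
      · simp [hk]
      · simp only [hk, Bool.false_eq_true, if_false]; exact ih

theorem contains_mk_map_pvG (l : List (String × List Int)) (k : String) :
    (PySem.Dict.mk (l.map pvG)).contains k = (PySem.Dict.mk l).contains k := by
  rw [PySem.Dict.contains_eq_isSome_get?, PySem.Dict.contains_eq_isSome_get?, get?_mk_map_pvG]
  cases (PySem.Dict.mk l).get? k <;> rfl

-- one step of A's running-min loop, on a dict that is the pymin-image of B's group dict
theorem step_eq (dB : PySem.Dict String (List Int)) (q : String × Int)
    (hnd : dB.keys.Nodup) (hne : ∀ p ∈ dB.items, p.2 ≠ []) :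
    (if (!((PySem.Dict.mk (dB.items.map pvG)).contains q.1)) ||
        (((PySem.Dict.mk (dB.items.map pvG)).contains q.1) &&
         decide (q.2 < (PySem.Dict.mk (dB.items.map pvG)).getD q.1 0)) then
       (PySem.Dict.mk (dB.items.map pvG)).insert q.1 q.2
     else (PySem.Dict.mk (dB.items.map pvG)))
    = PySem.Dict.mk ((dB.modify q.1 [] (fun l => l ++ [q.2])).items.map pvG) := by
  have hmk : PySem.Dict.mk dB.items = dB := by apply PySem.Dict.ext; rfl
  have hcont : (PySem.Dict.mk (dB.items.map pvG)).contains q.1 = dB.contains q.1 := by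
    rw [contains_mk_map_pvG, hmk]
  rw [PySem.Dict.modify]
  by_cases hc : dB.contains q.1 = true
  · -- key present: compare the stored minimum with the new score
    obtain ⟨l0, hl0⟩ : ∃ l0, dB.get? q.1 = some l0 := by
      rw [PySem.Dict.contains_eq_isSome_get?] at hc
      cases hg : dB.get? q.1 with
      | none => rw [hg] at hc; simp at hc
      | some v => exact ⟨v, rfl⟩
    have hl0mem : (q.1, l0) ∈ dB.items := PySem.Dict.mem_items_of_get?_eq_some dB hl0
    have hl0ne : l0 ≠ [] := hne _ hl0mem
    have hgetD : dB.getD q.1 [] = l0 := PySem.Dict.getD_of_get?_eq_some dB [] hl0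
    have hgetDA : (PySem.Dict.mk (dB.items.map pvG)).getD q.1 0 = pymin l0 := by
      rw [PySem.Dict.getD_eq_get?_getD, get?_mk_map_pvG, hmk, hl0]; rfl
    have hcontA : dB.contains (q.1) = true := hc
    rw [hcont, hgetDA, hc]
    have hitemsB : (dB.insert q.1 (dB.getD q.1 [] ++ [q.2])).items
        = dB.items.map (fun p => if p.1 == q.1 then (q.1, l0 ++ [q.2]) else p) := by
      rw [hgetD]; exact PySem.Dict.items_insert_of_contains dB _ hc
    by_cases hlt : q.2 < pymin l0
    · -- strictly smaller: A overwrites, B's group min becomes the new score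
      simp only [hlt, decide_true, Bool.and_true, Bool.or_true, if_true]
      apply PySem.Dict.ext
      have hcA : (PySem.Dict.mk (dB.items.map pvG)).contains q.1 = true := by rw [hcont]; exact hc
      rw [PySem.Dict.items_insert_of_contains _ _ hcA, hitemsB]
      show (dB.items.map pvG).map _ = (dB.items.map _).map pvG
      rw [List.map_map, List.map_map]
      apply List.map_congr_left
      intro p _
      by_cases hpq : p.1 = q.1
      · simp only [Function.comp_apply, pvG, hpq, BEq.rfl, if_true]
        rw [pymin_append_singleton l0 hl0ne]
        have : min (pymin l0) q.2 = q.2 := by omega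
        rw [this]
      · simp [Function.comp_apply, pvG, hpq]
    · -- not smaller: A keeps the old entry, B's group min is unchanged
      simp only [hlt, decide_false, Bool.and_false, Bool.or_false, Bool.not_eq_true']
      rw [if_neg (by simp)]
      apply PySem.Dict.ext
      rw [hitemsB]
      show dB.items.map pvG = (dB.items.map _).map pvG
      rw [List.map_map]
      apply List.map_congr_left
      intro p hp
      by_cases hpq : p.1 = q.1
      · have hpl : p.2 = l0 := by
          have h1 : dB.get? p.1 = some p.2 :=
            (PySem.Dict.get?_eq_some_iff_mem_items dB p.1 p.2 hnd).mpr (by simpa using hp)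
          rw [hpq, hl0] at h1
          exact (Option.some.inj h1).symm
        simp only [Function.comp_apply, hpq, BEq.rfl, if_true, pvG]
        rw [pymin_append_singleton l0 hl0ne]
        have : min (pymin l0) q.2 = pymin l0 := by omega
        rw [this, hpl]
      · simp [Function.comp_apply, pvG, hpq]
  · -- fresh key: both append a new entry
    have hc' : dB.contains q.1 = false := by simpa using hc
    have hcA : (PySem.Dict.mk (dB.items.map pvG)).contains q.1 = false := by rw [hcont]; exact hc'
    rw [hcont, hc']
    simp only [Bool.not_false, Bool.false_and, Bool.or_false, if_true]
    apply PySem.Dict.ext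
    rw [PySem.Dict.items_insert_of_not_contains _ _ hcA,
        PySem.Dict.getD_of_not_contains dB [] hc',
        PySem.Dict.items_insert_of_not_contains _ _ hc']
    simp [pvG, pymin]

theorem modify_keeps_nodup (dB : PySem.Dict String (List Int)) (q : String × Int)
    (hnd : dB.keys.Nodup) : (dB.modify q.1 [] (fun l => l ++ [q.2])).keys.Nodup := by
  rw [PySem.Dict.modify]; exact PySem.Dict.nodup_keys_insert dB q.1 _ hnd

theorem modify_keeps_ne (dB : PySem.Dict String (List Int)) (q : String × Int)
    (hne : ∀ p ∈ dB.items, p.2 ≠ []) :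
    ∀ p ∈ (dB.modify q.1 [] (fun l => l ++ [q.2])).items, p.2 ≠ [] := by
  intro p hp
  rw [PySem.Dict.modify] at hp
  by_cases hc : dB.contains q.1 = true
  · rw [PySem.Dict.items_insert_of_contains _ _ hc] at hp
    obtain ⟨p0, hp0, hp0e⟩ := List.mem_map.mp hp
    by_cases hk : p0.1 == q.1
    · rw [hk] at hp0e; simp only [if_true] at hp0e
      rw [← hp0e]; simp
    · simp only [hk, Bool.false_eq_true, if_false] at hp0e
      rw [← hp0e]; exact hne _ hp0
  · rw [PySem.Dict.items_insert_of_not_contains _ _ (by simpa using hc)] at hp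
    rcases List.mem_append.mp hp with h1 | h2
    · exact hne _ h1
    · simp only [List.mem_singleton] at h2
      rw [h2]; simp

-- the whole inner loop: A's dict is the pymin-image of B's group dict
theorem inner_inv (ps : List (String × Int)) (dB : PySem.Dict String (List Int))
    (hnd : dB.keys.Nodup) (hne : ∀ p ∈ dB.items, p.2 ≠ []) :
    (ps.foldl (fun d q =>
        if (!(d.contains q.1)) || ((d.contains q.1) && decide (q.2 < d.getD q.1 0)) then
          d.insert q.1 q.2
        else d) (PySem.Dict.mk (dB.items.map pvG)))
      = PySem.Dict.mk
          ((ps.foldl (fun d q => d.modify q.1 [] (fun l => l ++ [q.2])) dB).items.map pvG)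
    ∧ (ps.foldl (fun d q => d.modify q.1 [] (fun l => l ++ [q.2])) dB).keys.Nodup
    ∧ ∀ p ∈ (ps.foldl (fun d q => d.modify q.1 [] (fun l => l ++ [q.2])) dB).items, p.2 ≠ [] := by
  induction ps generalizing dB with
  | nil => exact ⟨rfl, hnd, hne⟩
  | cons q t ih =>
      simp only [List.foldl_cons]
      rw [step_eq dB q hnd hne]
      exact ih (dB.modify q.1 [] (fun l => l ++ [q.2])) (modify_keeps_nodup dB q hnd)
        (modify_keeps_ne dB q hne)

-- per-name: A's (keys, values) equal B's (keys, mins of the grouped scores)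
theorem name_eq (as : List String) (ss : List Int) (h : as.length ≤ ss.length) :
    ((PySem.List.pyRange 0 (as.length : Int) 1).foldl
      (fun (d : PySem.Dict String Int) abbindex =>
        let currentabbreviation := PySem.List.pyGetD as abbindex ""
        let currentscore := PySem.List.pyGetD ss abbindex 0
        if (!(d.contains currentabbreviation)) ||
           ((d.contains currentabbreviation) &&
            decide (currentscore < d.getD currentabbreviation 0)) then
          d.insert currentabbreviation currentscore
        else d) PySem.Dict.empty).keys
    = ((as.zip ss).foldl (fun (d : PySem.Dict String (List Int)) q =>
        d.modify q.1 [] (fun l => l ++ [q.2])) PySem.Dict.empty).keys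
  ∧ ((PySem.List.pyRange 0 (as.length : Int) 1).foldl
      (fun (d : PySem.Dict String Int) abbindex =>
        let currentabbreviation := PySem.List.pyGetD as abbindex ""
        let currentscore := PySem.List.pyGetD ss abbindex 0
        if (!(d.contains currentabbreviation)) ||
           ((d.contains currentabbreviation) &&
            decide (currentscore < d.getD currentabbreviation 0)) then
          d.insert currentabbreviation currentscore
        else d) PySem.Dict.empty).values
    = ((as.zip ss).foldl (fun (d : PySem.Dict String (List Int)) q =>
        d.modify q.1 [] (fun l => l ++ [q.2])) PySem.Dict.empty).values.map
        (fun gl => (PySem.List.min? gl (fun y => y)).getD 0) := by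
  have hz := foldl_range_two as ss "" 0
    (fun (d : PySem.Dict String Int) a s =>
      if (!(d.contains a)) || ((d.contains a) && decide (s < d.getD a 0)) then
        d.insert a s else d) PySem.Dict.empty h
  have hempty : (PySem.Dict.empty : PySem.Dict String Int)
      = PySem.Dict.mk (((PySem.Dict.empty : PySem.Dict String (List Int)).items).map pvG) := by
    apply PySem.Dict.ext; rfl
  have hndE : (PySem.Dict.empty : PySem.Dict String (List Int)).keys.Nodup := by
    simp [PySem.Dict.keys_empty]
  have hneE : ∀ p ∈ (PySem.Dict.empty : PySem.Dict String (List Int)).items, p.2 ≠ [] := by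
    intro p hp; simp [PySem.Dict.empty] at hp
  obtain ⟨heq, hnd', hne'⟩ := inner_inv (as.zip ss) PySem.Dict.empty hndE hneE
  have hfold :
      (PySem.List.pyRange 0 (as.length : Int) 1).foldl
        (fun (d : PySem.Dict String Int) abbindex =>
          let currentabbreviation := PySem.List.pyGetD as abbindex ""
          let currentscore := PySem.List.pyGetD ss abbindex 0
          if (!(d.contains currentabbreviation)) ||
             ((d.contains currentabbreviation) &&
              decide (currentscore < d.getD currentabbreviation 0)) then
            d.insert currentabbreviation currentscore
          else d) PySem.Dict.empty
      = PySem.Dict.mk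
          (((as.zip ss).foldl (fun d q => d.modify q.1 [] (fun l => l ++ [q.2]))
            PySem.Dict.empty).items.map pvG) := by
    rw [hz, hempty]; exact heq
  set dB' := (as.zip ss).foldl (fun (d : PySem.Dict String (List Int)) q =>
    d.modify q.1 [] (fun l => l ++ [q.2])) PySem.Dict.empty with hdB'
  constructor
  · rw [hfold]
    show (dB'.items.map pvG).map (fun x => x.1) = dB'.items.map (fun x => x.1)
    rw [List.map_map]; rfl
  · rw [hfold]
    show (dB'.items.map pvG).map (fun x => x.2)
        = (dB'.items.map (fun x => x.2)).map (fun gl => (PySem.List.min? gl (fun y => y)).getD 0)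
    rw [List.map_map, List.map_map]
    apply List.map_congr_left
    intro p hp
    have hpne : p.2 ≠ [] := hne' _ hp
    cases hl : p.2 with
    | nil => exact absurd hl hpne
    | cons x t =>
        simp only [Function.comp_apply, pvG, hl]
        rw [PySem.List.min?_id_cons]
        rfl

-- ===== VERDICT (by name: the statement is the Claim_ definition above) =====
theorem deduplicateWithin_spec : Claim_equal_deduplicateWithin := by
  intro abbreviations abbreviationscores _ hpre
  unfold Spec_deduplicateWithin deduplicateWithin deduplicateWithin_alt
  obtain ⟨hlen, hall⟩ := hpre
  rw [foldl_range_two abbreviations abbreviationscores [] []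
    (fun (acc : List (List String) × List (List Int)) as ss =>
      let minabbscore :=
        (PySem.List.pyRange 0 (as.length : Int) 1).foldl
          (fun (minabbscore : PySem.Dict String Int) abbindex =>
            let currentabbreviation := PySem.List.pyGetD as abbindex ""
            let currentscore := PySem.List.pyGetD ss abbindex 0
            if (!(minabbscore.contains currentabbreviation)) ||
               ((minabbscore.contains currentabbreviation) &&
                decide (currentscore < minabbscore.getD currentabbreviation 0)) then
              minabbscore.insert currentabbreviation currentscore
            else minabbscore)
          PySem.Dict.empty
      (acc.1 ++ [minabbscore.keys], acc.2 ++ [minabbscore.values]))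
    ([], []) hlen]
  apply PySem.List.foldl_congr_mem
  intro acc q hq
  obtain ⟨hk, hv⟩ := name_eq q.1 q.2 (hall q hq)
  simp only
  rw [hk, hv]
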